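-- pv_equiv track=rewrite | github.com/yanghansyuan/TNDA_The_Label_Breaker | Script/build_gallery_data.py | infer_ai_from_urls
-- ===== SOURCE A (Python) =====
-- def infer_ai_from_urls(urls):
--     if not urls:
--         return []
--     ai_map = []
--     for url in urls:
--         url_lower = url.lower()
--         if "chatgpt.com" in url_lower or "openai.com" in url_lower:
--             ai_map.append("ChatGPT")
--         elif "claude.ai" in url_lower or "anthropic.com" in url_lower:
--             ai_map.append("Claude")
--         elif (
--             "gemini.google.com" in url_lower
--             or "aistudio.google.com" in url_lower  # Google AI Studio 分享連結
--             or ("g.co" in url_lower and "gemini" in url_lower)  # 短網址 https://g.co/gemini/share/xxx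
--             or ("google.com" in url_lower and "gemini" in url_lower)
--         ):
--             ai_map.append("Gemini")
--         elif "copilot" in url_lower or "bing.com" in url_lower:
--             ai_map.append("Copilot")
--         elif "perplexity.ai" in url_lower:
--             ai_map.append("Perplexity")
--         elif "meta.ai" in url_lower or ("facebook.com" in url_lower and "/ai" in url_lower):
--             ai_map.append("Meta AI")
--         elif "grok.x.ai" in url_lower or ("x.ai" in url_lower and "grok" in url_lower) or ("x.com" in url_lower and "grok" in url_lower):
--             ai_map.append("Grok")
--         elif "deepseek.com" in url_lower:
--             ai_map.append("DeepSeek")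
--         elif "moonshot.cn" in url_lower or "kimi" in url_lower:
--             ai_map.append("Kimi")
--         elif "mistral.ai" in url_lower:
--             ai_map.append("Mistral")
--         elif "coze.com" in url_lower:
--             ai_map.append("Coze")
--         elif "doubao.com" in url_lower:
--             ai_map.append("豆包")
--         elif "yiyan.baidu.com" in url_lower or "wenxin.baidu.com" in url_lower:
--             ai_map.append("文心一言")
--         elif "qianwen.aliyun.com" in url_lower or "dashscope.aliyun.com" in url_lower:
--             ai_map.append("通義千問")
--         elif "01.ai" in url_lower or "yi.com" in url_lower:
--             ai_map.append("零一萬物")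
--         else:
--             ai_map.append("其他")
--     # 去重、保留順序
--     seen = set()
--     result = []
--     for x in ai_map:
--         if x not in seen:
--             seen.add(x)
--             result.append(x)
--     return result
-- ===== SOURCE B (Python) =====
-- _RULES = [
--     ("ChatGPT", lambda u: "chatgpt.com" in u or "openai.com" in u),
--     ("Claude", lambda u: "claude.ai" in u or "anthropic.com" in u),
--     ("Gemini", lambda u: "gemini.google.com" in u or "aistudio.google.com" in u
--         or ("g.co" in u and "gemini" in u) or ("google.com" in u and "gemini" in u)),
--     ("Copilot", lambda u: "copilot" in u or "bing.com" in u),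
--     ("Perplexity", lambda u: "perplexity.ai" in u),
--     ("Meta AI", lambda u: "meta.ai" in u or ("facebook.com" in u and "/ai" in u)),
--     ("Grok", lambda u: "grok.x.ai" in u or ("x.ai" in u and "grok" in u) or ("x.com" in u and "grok" in u)),
--     ("DeepSeek", lambda u: "deepseek.com" in u),
--     ("Kimi", lambda u: "moonshot.cn" in u or "kimi" in u),
--     ("Mistral", lambda u: "mistral.ai" in u),
--     ("Coze", lambda u: "coze.com" in u),
--     ("豆包", lambda u: "doubao.com" in u),
--     ("文心一言", lambda u: "yiyan.baidu.com" in u or "wenxin.baidu.com" in u),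
--     ("通義千問", lambda u: "qianwen.aliyun.com" in u or "dashscope.aliyun.com" in u),
--     ("零一萬物", lambda u: "01.ai" in u or "yi.com" in u),
-- ]
--
-- _ALL_LABELS = [name for name, _ in _RULES] + ["其他"]
--
--
-- def _label(url_lower):
--     for name, pred in _RULES:
--         if pred(url_lower):
--             return name
--     return "其他"
--
--
-- def infer_ai_from_urls(urls):
--     # Label-major algorithm: classify every URL once, then take the fixed label
--     # universe, keep the labels that occur, and order them by their first
--     # occurrence index. No seen-set, no streaming dedup.
--     labels = [_label(url.lower()) for url in urls]
--     present = [lab for lab in _ALL_LABELS if lab in labels]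
--     return sorted(present, key=labels.index)
-- ===== Notes on version B (the rewrite author's own statement) =====
-- stated objective: alternative
-- what changed: B replaces A's streaming seen-set dedup by a label-major algorithm: it classifies each URL once (via a data-driven first-match rules table), then scans the fixed 16-label universe for labels that occur and sorts them by first-occurrence index, which yields the same first-occurrence order without any seen set.
import Mathlib
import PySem

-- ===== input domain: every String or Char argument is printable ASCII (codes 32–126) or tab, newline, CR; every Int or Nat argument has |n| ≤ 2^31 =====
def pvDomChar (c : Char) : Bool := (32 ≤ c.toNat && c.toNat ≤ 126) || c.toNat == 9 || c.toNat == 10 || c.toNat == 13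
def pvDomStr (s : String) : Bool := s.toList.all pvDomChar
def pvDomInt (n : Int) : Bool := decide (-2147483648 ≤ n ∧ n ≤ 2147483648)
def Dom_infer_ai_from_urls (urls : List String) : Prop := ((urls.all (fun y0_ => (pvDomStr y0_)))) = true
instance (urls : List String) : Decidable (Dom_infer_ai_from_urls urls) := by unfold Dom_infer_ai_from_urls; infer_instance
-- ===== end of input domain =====

-- B replaces A's streaming seen-set dedup by a label-major algorithm (classify once, keep occurring labels from the fixed universe, sort by first-occurrence index); alternative decomposition, same cost.


-- ===== PORT A =====
-- classification if-chain of A's loop body (literal, same check order)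
def inferA_classify (url : String) : String :=
  let u := PySem.Str.lower url
  if PySem.Str.isIn "chatgpt.com" u || PySem.Str.isIn "openai.com" u then "ChatGPT"
  else if PySem.Str.isIn "claude.ai" u || PySem.Str.isIn "anthropic.com" u then "Claude"
  else if PySem.Str.isIn "gemini.google.com" u || PySem.Str.isIn "aistudio.google.com" u
      || (PySem.Str.isIn "g.co" u && PySem.Str.isIn "gemini" u)
      || (PySem.Str.isIn "google.com" u && PySem.Str.isIn "gemini" u) then "Gemini"
  else if PySem.Str.isIn "copilot" u || PySem.Str.isIn "bing.com" u then "Copilot"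
  else if PySem.Str.isIn "perplexity.ai" u then "Perplexity"
  else if PySem.Str.isIn "meta.ai" u || (PySem.Str.isIn "facebook.com" u && PySem.Str.isIn "/ai" u) then "Meta AI"
  else if PySem.Str.isIn "grok.x.ai" u || (PySem.Str.isIn "x.ai" u && PySem.Str.isIn "grok" u)
      || (PySem.Str.isIn "x.com" u && PySem.Str.isIn "grok" u) then "Grok"
  else if PySem.Str.isIn "deepseek.com" u then "DeepSeek"
  else if PySem.Str.isIn "moonshot.cn" u || PySem.Str.isIn "kimi" u then "Kimi"
  else if PySem.Str.isIn "mistral.ai" u then "Mistral"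
  else if PySem.Str.isIn "coze.com" u then "Coze"
  else if PySem.Str.isIn "doubao.com" u then "豆包"
  else if PySem.Str.isIn "yiyan.baidu.com" u || PySem.Str.isIn "wenxin.baidu.com" u then "文心一言"
  else if PySem.Str.isIn "qianwen.aliyun.com" u || PySem.Str.isIn "dashscope.aliyun.com" u then "通義千問"
  else if PySem.Str.isIn "01.ai" u || PySem.Str.isIn "yi.com" u then "零一萬物"
  else "其他"

def infer_ai_from_urls (urls : List String) : List String :=
  if urls = [] then []
  else
    let ai_map := urls.foldl (fun acc url => acc ++ [inferA_classify url]) []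
    (ai_map.foldl (fun (st : PySem.Set String × List String) x =>
        if st.1.contains x then st else (st.1.add x, st.2 ++ [x])) (PySem.Set.empty, [])).2

-- ===== PORT B =====
-- data-driven rules table: first matching (label, predicate) wins
def pvRules : List (String × (String → Bool)) :=
  [("ChatGPT", fun u => PySem.Str.isIn "chatgpt.com" u || PySem.Str.isIn "openai.com" u),
   ("Claude", fun u => PySem.Str.isIn "claude.ai" u || PySem.Str.isIn "anthropic.com" u),
   ("Gemini", fun u => PySem.Str.isIn "gemini.google.com" u || PySem.Str.isIn "aistudio.google.com" u
      || (PySem.Str.isIn "g.co" u && PySem.Str.isIn "gemini" u)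
      || (PySem.Str.isIn "google.com" u && PySem.Str.isIn "gemini" u)),
   ("Copilot", fun u => PySem.Str.isIn "copilot" u || PySem.Str.isIn "bing.com" u),
   ("Perplexity", fun u => PySem.Str.isIn "perplexity.ai" u),
   ("Meta AI", fun u => PySem.Str.isIn "meta.ai" u || (PySem.Str.isIn "facebook.com" u && PySem.Str.isIn "/ai" u)),
   ("Grok", fun u => PySem.Str.isIn "grok.x.ai" u || (PySem.Str.isIn "x.ai" u && PySem.Str.isIn "grok" u)
      || (PySem.Str.isIn "x.com" u && PySem.Str.isIn "grok" u)),
   ("DeepSeek", fun u => PySem.Str.isIn "deepseek.com" u),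
   ("Kimi", fun u => PySem.Str.isIn "moonshot.cn" u || PySem.Str.isIn "kimi" u),
   ("Mistral", fun u => PySem.Str.isIn "mistral.ai" u),
   ("Coze", fun u => PySem.Str.isIn "coze.com" u),
   ("豆包", fun u => PySem.Str.isIn "doubao.com" u),
   ("文心一言", fun u => PySem.Str.isIn "yiyan.baidu.com" u || PySem.Str.isIn "wenxin.baidu.com" u),
   ("通義千問", fun u => PySem.Str.isIn "qianwen.aliyun.com" u || PySem.Str.isIn "dashscope.aliyun.com" u),
   ("零一萬物", fun u => PySem.Str.isIn "01.ai" u || PySem.Str.isIn "yi.com" u)]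

-- _ALL_LABELS = rule names + "其他"
def pvAllLabels : List String :=
  pvRules.map Prod.fst ++ ["其他"]

def pvFirstLabel : List (String × (String → Bool)) → String → String
  | [], _ => "其他"
  | (name, pred) :: rest, u => if pred u then name else pvFirstLabel rest u

-- labels.index(lab): lab is guaranteed to occur (lab ∈ present), so .getD 0 is never the default
def infer_ai_from_urls_alt (urls : List String) : List String :=
  let labels := urls.map (fun url => pvFirstLabel pvRules (PySem.Str.lower url))
  let present := pvAllLabels.filter (fun lab => labels.contains lab)
  PySem.List.sorted present (fun lab => (PySem.List.index? labels lab).getD 0) false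

-- ===== PRECONDITION & SPEC =====
def Spec_infer_ai_from_urls (urls : List String) (out : List String) : Prop := out = infer_ai_from_urls_alt urls
instance (urls : List String) (out : List String) : Decidable (Spec_infer_ai_from_urls urls out) := by unfold Spec_infer_ai_from_urls; infer_instance

-- ===== CLAIM (what is proved, stated in full; the proofs are below) =====
def Claim_equal_infer_ai_from_urls : Prop := ∀ (urls : List String), Dom_infer_ai_from_urls urls → Spec_infer_ai_from_urls urls (infer_ai_from_urls urls)

-- ===== LEMMAS AND PROOFS =====

theorem classify_eq (u : String) :
    inferA_classify u = pvFirstLabel pvRules (PySem.Str.lower u) := by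
  simp only [inferA_classify, pvRules, pvFirstLabel]

-- the first-match label is always a rule name or the default
theorem firstLabel_mem (rules : List (String × (String → Bool))) (u : String) :
    pvFirstLabel rules u ∈ rules.map Prod.fst ++ ["其他"] := by
  induction rules with
  | nil => simp [pvFirstLabel]
  | cons r rest ih =>
    obtain ⟨name, pred⟩ := r
    simp only [pvFirstLabel]
    by_cases h : pred u
    · simp [h]
    · simp only [if_neg h, List.map_cons, List.cons_append, List.mem_cons]
      exact Or.inr ih

theorem classify_mem_all (u : String) :
    pvFirstLabel pvRules u ∈ pvAllLabels := firstLabel_mem pvRules u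

-- A's dedup loop keeps its seen set and its result list identical
theorem A_fold_pair (xs : List String) (S : PySem.Set String) :
    xs.foldl (fun (st : PySem.Set String × List String) x =>
        if st.1.contains x then st else (st.1.add x, st.2 ++ [x])) (S, S)
      = (xs.foldl PySem.Set.add S, xs.foldl PySem.Set.add S) := by
  induction xs generalizing S with
  | nil => rfl
  | cons x t ih =>
    simp only [List.foldl_cons]
    by_cases h : x ∈ S
    · rw [if_pos ((PySem.Set.contains_iff S x).2 h), PySem.Set.add_of_mem h]
      exact ih S
    · have hc : ¬ (PySem.Set.contains S x = true) := fun hc => h ((PySem.Set.contains_iff S x).1 hc)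
      rw [if_neg hc, PySem.Set.add_of_not_mem h]
      exact ih (S ++ [x])

theorem A_result_eq_dedup (xs : List String) :
    (xs.foldl (fun (st : PySem.Set String × List String) x =>
        if st.1.contains x then st else (st.1.add x, st.2 ++ [x]))
      (PySem.Set.empty, [])).2 = PySem.List.dedup xs := by
  have h := A_fold_pair xs []
  have he : ((PySem.Set.empty : PySem.Set String), ([] : List String))
      = (([] : List String), ([] : List String)) := rfl
  rw [he, h, PySem.List.dedup_eq_ofList, PySem.Set.ofList_eq_foldl]

-- first-occurrence dedup appends x at the right end exactly when x is new
theorem dedup_append_singleton (xs : List String) (x : String) :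
    PySem.List.dedup (xs ++ [x])
      = if x ∈ xs then PySem.List.dedup xs else PySem.List.dedup xs ++ [x] := by
  rw [PySem.List.dedup_eq_ofList, PySem.Set.ofList_append_singleton, PySem.Set.add_eq_ite]
  simp [PySem.Set.mem_ofList, PySem.List.dedup_eq_ofList]

-- along the first-occurrence dedup, first-occurrence indices strictly increase
theorem dedup_pairwise_index (xs : List String) :
    (PySem.List.dedup xs).Pairwise
      (fun a b => (PySem.List.index? xs a).getD 0 < (PySem.List.index? xs b).getD 0) := by
  induction xs using List.reverseRecOn with
  | nil => simp [PySem.List.dedup]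
  | append_singleton t y ih =>
    rw [dedup_append_singleton]
    by_cases hy : y ∈ t
    · rw [if_pos hy]
      refine ih.imp_of_mem ?_
      intro a b ha hb hlt
      have ha' : a ∈ t := (PySem.List.mem_dedup t a).1 ha
      have hb' : b ∈ t := (PySem.List.mem_dedup t b).1 hb
      rwa [PySem.List.index?_append_of_mem [y] ha', PySem.List.index?_append_of_mem [y] hb']
    · rw [if_neg hy, List.pairwise_append]
      refine ⟨ih.imp_of_mem ?_, by simp, ?_⟩
      · intro a b ha hb hlt
        have ha' : a ∈ t := (PySem.List.mem_dedup t a).1 ha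
        have hb' : b ∈ t := (PySem.List.mem_dedup t b).1 hb
        rwa [PySem.List.index?_append_of_mem [y] ha', PySem.List.index?_append_of_mem [y] hb']
      · intro a ha b hb
        rw [List.mem_singleton] at hb
        rw [hb]
        have ha' : a ∈ t := (PySem.List.mem_dedup t a).1 ha
        rw [PySem.List.index?_append_of_mem [y] ha', PySem.List.index?_append_singleton_self _ _ hy]
        obtain ⟨k, hk⟩ := Option.isSome_iff_exists.1 ((PySem.List.index?_isSome_iff t a).2 ha')
        obtain ⟨hklt, -⟩ := PySem.List.getElem_of_index?_eq_some hk
        rw [PySem.List.index?_eq_idxOf?] at hk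
        simp [hk, hklt]

theorem pvAllLabels_nodup : pvAllLabels.Nodup := by decide

-- B's sorted-by-first-index list of occurring labels IS the first-occurrence dedup
theorem B_sorted_eq (labels : List String)
    (hall : ∀ l ∈ labels, l ∈ pvAllLabels) :
    PySem.List.sorted (pvAllLabels.filter (fun lab => labels.contains lab))
      (fun lab => (PySem.List.index? labels lab).getD 0) false
      = PySem.List.dedup labels := by
  apply PySem.List.sorted_eq_of_perm_of_pairwise_lt
  · refine (List.perm_ext_iff_of_nodup (PySem.List.nodup_dedup _)
      (pvAllLabels_nodup.filter _)).2 ?_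
    intro a
    simp only [PySem.List.mem_dedup, List.mem_filter, List.contains_eq_mem, decide_eq_true_eq]
    exact ⟨fun h => ⟨hall a h, h⟩, fun h => h.2⟩
  · exact dedup_pairwise_index labels

-- ===== VERDICT (by name: the statement is the Claim_ definition above) =====
theorem infer_ai_from_urls_spec : Claim_equal_infer_ai_from_urls := by
  intro urls _
  unfold Spec_infer_ai_from_urls infer_ai_from_urls infer_ai_from_urls_alt
  by_cases h : urls = []
  · subst h; rfl
  · rw [if_neg h, PySem.List.foldl_append_singleton_eq_map, A_result_eq_dedup]
    have hmap : urls.map inferA_classify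
        = urls.map (fun url => pvFirstLabel pvRules (PySem.Str.lower url)) :=
      List.map_congr_left (fun u _ => classify_eq u)
    rw [hmap]
    refine (B_sorted_eq _ ?_).symm
    intro l hl
    obtain ⟨u, -, rfl⟩ := List.mem_map.1 hl
    exact classify_mem_all _
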